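-- pv_equiv track=rewrite | github.com/uttamapaksa/algorithm | 프로그래머스/2/17683. ［3차］ 방금그곡/［3차］ 방금그곡.py | solution
-- ===== SOURCE A (Python) =====
-- def solution(memory, musicinfos):
--     idx = 0
--     tmps = []
--     m = len(memory)
--     while idx < m:
--         tmp = memory[idx]
--         idx += 1
--         if idx < m and memory[idx] == "#":
--             tmps.append(tmp.lower())
--             idx += 1
--         else:
--             tmps.append(tmp)
--     memory = "".join(tmps)
--
--     arr = []
--     n = len(musicinfos)
--     for i in range(n):
--         s, e, title, song = musicinfos[i].split(",")
--         sh, sm = map(int, s.split(":"))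
--         eh, em = map(int, e.split(":"))
--         time = (eh * 60 + em) - (sh * 60 + sm)
--
--         idx = 0
--         tmps = []
--         m = len(song)
--         while idx < m:
--             tmp = song[idx]
--             idx += 1
--             if idx < m and song[idx] == "#":
--                 tmps.append(tmp.lower())
--                 idx += 1
--             else:
--                 tmps.append(tmp)
--         m = len(tmps)
--         div, mod = time // m, time % m
--         song = ""
--         song += "".join(tmps) * div
--         song += "".join(tmps[:mod])
--         arr.append((time, n-i, title, song))
--
--     arr.sort(reverse=True)
--     answer = "(None)"
--     for _, _, title, song in arr:
--         if memory in song: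
--             answer = title
--             break
--
--     return answer
-- ===== SOURCE B (Python) =====
-- def _normalize(s):
--     out = []
--     pending = None
--     for ch in s:
--         if pending is None:
--             pending = ch
--         elif ch == '#':
--             out.append(pending.lower())
--             pending = None
--         else:
--             out.append(pending)
--             pending = ch
--     if pending is not None:
--         out.append(pending)
--     return ''.join(out)
--
--
-- def solution(memory, musicinfos):
--     mem = _normalize(memory)
--     best_time = None
--     answer = "(None)"
--     for info in musicinfos:
--         start, end, title, song = info.split(",")
--         sh, sm = map(int, start.split(":"))
--         eh, em = map(int, end.split(":"))
--         time = (eh - sh) * 60 + (em - sm)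
--         notes = _normalize(song)
--         k = len(notes)
--         expanded = notes * (time // k) + notes[:time % k]
--         if mem in expanded and (best_time is None or time > best_time):
--             best_time = time
--             answer = title
--     return answer
-- ===== Notes on version B (the rewrite author's own statement) =====
-- stated objective: simpler
-- what changed: B normalizes '#'-notes with a one-pending-char state machine instead of A's index/lookahead loop and selects the answer in a single pass keeping the running best (update only on strictly greater play time, so equal-time ties keep the earliest song), instead of A's build-a-list-of-4-tuples, reverse sort and scan-for-first-match.
import Mathlib
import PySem

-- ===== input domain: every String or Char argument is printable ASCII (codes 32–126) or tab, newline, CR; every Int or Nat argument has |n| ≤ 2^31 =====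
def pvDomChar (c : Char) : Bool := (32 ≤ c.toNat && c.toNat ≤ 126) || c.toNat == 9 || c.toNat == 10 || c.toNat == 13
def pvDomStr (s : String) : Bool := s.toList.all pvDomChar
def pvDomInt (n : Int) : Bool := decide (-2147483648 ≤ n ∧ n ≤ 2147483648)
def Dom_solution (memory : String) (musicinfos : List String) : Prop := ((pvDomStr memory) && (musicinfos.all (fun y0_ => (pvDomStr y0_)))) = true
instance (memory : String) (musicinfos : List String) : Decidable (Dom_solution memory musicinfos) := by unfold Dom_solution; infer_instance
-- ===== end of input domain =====

-- B replaces A's build-all/sort/scan selection by a single pass keeping the running best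
-- (strictly-greater play time wins, so equal-time ties keep the earliest song, exactly like
-- A's stable reverse sort on (time, n-i)), and A's index/lookahead '#'-folding loop by a
-- one-char-pending state machine; objective: simpler.

-- ===== PORT A =====
-- A's while-loop over idx with lookahead memory[idx] == "#": structural recursion on the chars.
def pvNormA : List Char → List Char
  | [] => []
  | [c] => [c]
  | c :: d :: rest =>
    if d = '#' then PySem.Chars.lowerChar c :: pvNormA rest
    else c :: pvNormA (d :: rest)

-- sh, sm = map(int, s.split(":")); value sh*60+sm (none where Python raises)
def pvTimeA? (x : String) : Option Int :=
  match PySem.Str.split? x ":" with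
  | some [h, mnt] =>
    match PySem.Int.ofStr? h, PySem.Int.ofStr? mnt with
    | some hv, some mv => some (hv * 60 + mv)
    | _, _ => none
  | _ => none

-- one iteration of A's for-loop body: (time, title, duration-expanded normalized song);
-- none exactly where Python raises (bad split shapes, int() failure, empty normalized song).
def pvParseA (info : String) : Option (Int × String × List Char) :=
  match PySem.Str.split? info "," with
  | some [s, e, title, song] =>
    match pvTimeA? s, pvTimeA? e with
    | some ts, some te =>
      let time := te - ts
      let tmps := pvNormA song.toList
      if tmps.length = 0 then none
      else some (time, title,
        PySem.List.pyRepeat tmps (PySem.Int.floordiv time (tmps.length : Int)) ++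
        PySem.List.slice tmps none (some (PySem.Int.mod time (tmps.length : Int))))
    | _, _ => none
  | _ => none

-- arr.append((time, n-i, title, song)); the none branch is unreachable on Pre_ (A raises there)
def pvEntry (n : Int) (p : Int × String) : Int × Int × String × List Char :=
  match pvParseA p.2 with
  | some (t, title, song) => (t, n - p.1, title, song)
  | none => (0, 0, "", [])

-- arr.sort(reverse=True) on 4-tuples: components 3 and 4 are never consulted because the
-- second components n-i are pairwise distinct, so the sort is exactly sorted2 on (time, n-i);
-- then the break-on-first-match scan of the sorted list.
def solution (memory : String) (musicinfos : List String) : String :=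
  let mem := pvNormA memory.toList
  let arr := (PySem.List.enumerate musicinfos).map (pvEntry (musicinfos.length : Int))
  let arr2 := PySem.List.sorted2 arr (fun x => x.1) (fun x => x.2.1) true
  match arr2.find? (fun x => PySem.Chars.isIn mem x.2.2.2) with
  | some x => x.2.2.1
  | none => "(None)"

-- ===== PORT B =====
-- B's pending-char state machine: fold over the chars with state (emitted, pending).
def pvNormBStep (st : List Char × Option Char) (ch : Char) : List Char × Option Char :=
  match st.2 with
  | none => (st.1, some ch)
  | some p => if ch = '#' then (st.1 ++ [PySem.Chars.lowerChar p], none)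
              else (st.1 ++ [p], some ch)

def pvNormBFinish (st : List Char × Option Char) : List Char :=
  match st.2 with
  | some p => st.1 ++ [p]
  | none => st.1

def pvNormB (s : List Char) : List Char :=
  pvNormBFinish (s.foldl pvNormBStep ([], none))

-- h, m = map(int, ts.split(":")) as the pair (h, m)
def pvHM? (x : String) : Option (Int × Int) :=
  match PySem.Str.split? x ":" with
  | some [h, mnt] =>
    match PySem.Int.ofStr? h, PySem.Int.ofStr? mnt with
    | some hv, some mv => some (hv, mv)
    | _, _ => none
  | _ => none

-- one iteration of B's loop body up to the membership test
def pvParseB (info : String) : Option (Int × String × List Char) :=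
  match PySem.Str.split? info "," with
  | some [s, e, title, song] =>
    match pvHM? s, pvHM? e with
    | some (sh, sm), some (eh, em) =>
      let time := (eh - sh) * 60 + (em - sm)
      let notes := pvNormB song.toList
      if notes.length = 0 then none
      else some (time, title,
        PySem.List.pyRepeat notes (PySem.Int.floordiv time (notes.length : Int)) ++
        PySem.List.slice notes none (some (PySem.Int.mod time (notes.length : Int))))
    | _, _ => none
  | _ => none

-- B's running best: update only when the melody matches AND the time is strictly greater.
def pvBStep (mem : List Char) (st : Option Int × String) (info : String) : Option Int × String :=
  match pvParseB info with
  | none => st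
  | some (t, title, song) =>
    if PySem.Chars.isIn mem song &&
       (match st.1 with | none => true | some b => decide (b < t)) then (some t, title)
    else st

def solution_alt (memory : String) (musicinfos : List String) : String :=
  (musicinfos.foldl (pvBStep (pvNormB memory.toList)) (none, "(None)")).2

-- ===== PRECONDITION & SPEC =====
def pvTimeOk (x : String) : Bool :=
  match PySem.Str.split? x ":" with
  | some [h, mnt] => (PySem.Int.ofStr? h).isSome && (PySem.Int.ofStr? mnt).isSome
  | _ => false

def pvInfoOk (info : String) : Bool :=
  match PySem.Str.split? info "," with
  | some [s, e, _, song] => pvTimeOk s && pvTimeOk e && !(song == "")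
  | _ => false

-- Pre_ excludes exactly the inputs where Python A raises: an info line that does not split on
-- "," into exactly 4 fields, a time field that does not split on ":" into 2 int()-parsable
-- fields (ValueError/unpacking error), or an empty song field (ZeroDivisionError time % 0).
def Pre_solution (memory : String) (musicinfos : List String) : Prop :=
  musicinfos.all pvInfoOk = true
instance (memory : String) (musicinfos : List String) : Decidable (Pre_solution memory musicinfos) := by
  unfold Pre_solution; infer_instance

def pvWitness_solution : String × List String :=
  ("ABC", ["12:00,12:14,HELLO,C#DEF", "13:00,13:05,WORLD,ABCDEF"])

def Spec_solution (memory : String) (musicinfos : List String) (out : String) : Prop := out = solution_alt memory musicinfos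
instance (memory : String) (musicinfos : List String) (out : String) : Decidable (Spec_solution memory musicinfos out) := by unfold Spec_solution; infer_instance

-- ===== CLAIM (what is proved, stated in full; the proofs are below) =====
def Claim_equal_solution : Prop := ∀ (memory : String) (musicinfos : List String), Dom_solution memory musicinfos → Pre_solution memory musicinfos → Spec_solution memory musicinfos (solution memory musicinfos)

-- ===== LEMMAS AND PROOFS =====

-- B's normalization state machine computes A's lookahead normalization.
theorem pvNormB_inv (l acc : List Char) (po : Option Char) :
    pvNormBFinish (l.foldl pvNormBStep (acc, po))
      = acc ++ pvNormA (match po with | some p => p :: l | none => l) := by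
  induction l generalizing acc po with
  | nil =>
    cases po <;> simp [pvNormBFinish, pvNormA]
  | cons c l ih =>
    cases po with
    | none => simpa [pvNormBStep] using ih acc (some c)
    | some p =>
      by_cases hc : c = '#'
      · subst hc
        simpa [pvNormBStep, pvNormA] using ih (acc ++ [PySem.Chars.lowerChar p]) none
      · simpa [pvNormBStep, pvNormA, hc] using ih (acc ++ [p]) (some c)

theorem pvNormB_eq (s : List Char) : pvNormB s = pvNormA s := by
  simpa using pvNormB_inv s [] none

theorem pvTimeA_eq_hm (x : String) :
    pvTimeA? x = (pvHM? x).map (fun p => p.1 * 60 + p.2) := by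
  unfold pvTimeA? pvHM?
  cases PySem.Str.split? x ":" with
  | none => rfl
  | some l =>
    rcases l with _ | ⟨h, _ | ⟨m, _ | ⟨y, rest⟩⟩⟩
    · rfl
    · rfl
    · cases hh : PySem.Int.ofStr? h <;> cases hm : PySem.Int.ofStr? m <;> simp [hh, hm]
    · rfl

theorem pvParseB_eq (info : String) : pvParseB info = pvParseA info := by
  unfold pvParseA pvParseB
  cases PySem.Str.split? info "," with
  | none => rfl
  | some parts =>
    rcases parts with _ | ⟨s, _ | ⟨e, _ | ⟨ttl, _ | ⟨song, _ | ⟨y, rest⟩⟩⟩⟩⟩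
    · rfl
    · rfl
    · rfl
    · rfl
    · simp only [pvTimeA_eq_hm]
      cases hs : pvHM? s with
      | none => rfl
      | some hsv =>
        cases he : pvHM? e with
        | none => rfl
        | some hev =>
          obtain ⟨sh, sm⟩ := hsv
          obtain ⟨eh, em⟩ := hev
          have ht : (eh - sh) * 60 + (em - sm) = eh * 60 + em - (sh * 60 + sm) := by ring
          simp [ht, pvNormB_eq]
    · rfl

theorem pvNormA_ne_nil (cs : List Char) (h : cs ≠ []) : pvNormA cs ≠ [] := by
  match cs with
  | [c] => simp [pvNormA]
  | c :: d :: rest => simp only [pvNormA]; split <;> simp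

theorem pvTimeOk_some (x : String) (h : pvTimeOk x = true) : ∃ v, pvTimeA? x = some v := by
  unfold pvTimeOk at h
  unfold pvTimeA?
  cases hsp : PySem.Str.split? x ":" with
  | none => rw [hsp] at h; exact absurd h (by simp)
  | some l =>
    rw [hsp] at h
    rcases l with _ | ⟨hh, _ | ⟨mm, _ | ⟨y, rest⟩⟩⟩
    · exact absurd h (by simp)
    · exact absurd h (by simp)
    · simp only [Bool.and_eq_true, Option.isSome_iff_exists] at h
      obtain ⟨⟨hv, hhv⟩, ⟨mv, hmv⟩⟩ := h
      simp [hhv, hmv]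
    · exact absurd h (by simp)

theorem pvInfoOk_parse (info : String) (h : pvInfoOk info = true) :
    ∃ t ttl sg, pvParseA info = some (t, ttl, sg) := by
  unfold pvInfoOk at h
  unfold pvParseA
  cases hsp : PySem.Str.split? info "," with
  | none => rw [hsp] at h; exact absurd h (by simp)
  | some parts =>
    rw [hsp] at h
    rcases parts with _ | ⟨s, _ | ⟨e, _ | ⟨ttl, _ | ⟨song, _ | ⟨y, rest⟩⟩⟩⟩⟩
    · exact absurd h (by simp)
    · exact absurd h (by simp)
    · exact absurd h (by simp)
    · exact absurd h (by simp)
    · simp only [Bool.and_eq_true, Bool.not_eq_eq_eq_not, Bool.not_true, beq_eq_false_iff_ne,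
        ne_eq] at h
      obtain ⟨⟨hts, hte⟩, hsong⟩ := h
      obtain ⟨vs, hvs⟩ := pvTimeOk_some s hts
      obtain ⟨ve, hve⟩ := pvTimeOk_some e hte
      have hnn : pvNormA song.toList ≠ [] := by
        apply pvNormA_ne_nil
        simpa using hsong
      simp only [hvs, hve]
      rw [if_neg (by simpa using hnn)]
      exact ⟨_, _, _, rfl⟩
    · exact absurd h (by simp)

-- the key order sorted2 uses on (time, n-i)
def pvLt (a b : Int × Int × String × List Char) : Bool :=
  decide (a.1 < b.1) || (!decide (b.1 < a.1) && decide (a.2.1 < b.2.1))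

theorem pvLt_iff (a b : Int × Int × String × List Char) :
    pvLt a b = true ↔ (a.1 < b.1 ∨ (¬ b.1 < a.1 ∧ a.2.1 < b.2.1)) := by
  simp [pvLt]

theorem pvLt_false_iff (a b : Int × Int × String × List Char) :
    pvLt a b = false ↔ (¬ a.1 < b.1 ∧ (b.1 < a.1 ∨ ¬ a.2.1 < b.2.1)) := by
  simp [pvLt]; omega

def pvIns (acc : List (Int × Int × String × List Char)) (x : Int × Int × String × List Char) :
    List (Int × Int × String × List Char) :=
  PySem.List.insertBy (fun a b => pvLt b a) x acc

theorem pvSorted2_eq (arr : List (Int × Int × String × List Char)) :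
    PySem.List.sorted2 arr (fun x => x.1) (fun x => x.2.1) true = arr.foldl pvIns [] := rfl

theorem pvLt_asymm {a b : Int × Int × String × List Char} (h : pvLt a b = true) :
    pvLt b a = false := by
  rw [pvLt_iff] at h; rw [pvLt_false_iff]; omega

theorem pvLt_trans {a b c : Int × Int × String × List Char}
    (h1 : pvLt a b = true) (h2 : pvLt b c = true) : pvLt a c = true := by
  rw [pvLt_iff] at h1 h2 ⊢; omega

theorem pvIns_pairwise (x : Int × Int × String × List Char) (ys : List (Int × Int × String × List Char))
    (h : ys.Pairwise (fun a b => pvLt a b = false)) :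
    (pvIns ys x).Pairwise (fun a b => pvLt a b = false) := by
  unfold pvIns
  induction ys with
  | nil => simp [PySem.List.insertBy]
  | cons y ys ih =>
    rw [List.pairwise_cons] at h
    obtain ⟨h1, h2⟩ := h
    by_cases hb : pvLt y x = true
    · rw [show PySem.List.insertBy (fun a b => pvLt b a) x (y :: ys) = x :: y :: ys by
        simp [PySem.List.insertBy, hb]]
      refine List.Pairwise.cons ?_ (List.Pairwise.cons h1 h2)
      intro z hz
      rcases List.mem_cons.mp hz with rfl | hzys
      · exact pvLt_asymm hb
      · by_contra hxz
        rw [Bool.not_eq_false] at hxz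
        have := pvLt_trans hb hxz
        rw [h1 z hzys] at this
        exact Bool.false_ne_true this
    · rw [show PySem.List.insertBy (fun a b => pvLt b a) x (y :: ys)
            = y :: PySem.List.insertBy (fun a b => pvLt b a) x ys by
        simp [PySem.List.insertBy, hb]]
      refine List.Pairwise.cons ?_ (ih h2)
      intro z hz
      rcases (PySem.List.insertBy_mem_iff _ x z ys).mp hz with rfl | hzys
      · exact Bool.not_eq_true _ ▸ (Bool.eq_false_iff.mpr (fun hc => hb hc))
      · exact h1 z hzys

theorem pvFoldIns_pairwise (xs acc : List (Int × Int × String × List Char))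
    (h : acc.Pairwise (fun a b => pvLt a b = false)) :
    (xs.foldl pvIns acc).Pairwise (fun a b => pvLt a b = false) := by
  induction xs generalizing acc with
  | nil => exact h
  | cons a xs ih => exact ih _ (pvIns_pairwise a acc h)

theorem pvFoldIns_perm (xs acc : List (Int × Int × String × List Char)) :
    (xs.foldl pvIns acc).Perm (acc ++ xs) := by
  induction xs generalizing acc with
  | nil => simp
  | cons a xs ih =>
    refine (ih (pvIns acc a)).trans ?_
    have h1 : (pvIns acc a ++ xs).Perm ((a :: acc) ++ xs) :=
      List.Perm.append_right xs (PySem.List.insertBy_perm _ a acc)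
    exact h1.trans List.perm_middle.symm

def pvSelStep (f : Int × Int × String × List Char → Bool)
    (st : Option Int × String) (e : Int × Int × String × List Char) : Option Int × String :=
  if f e && (match st.1 with | none => true | some b => decide (b < e.1)) then (some e.1, e.2.2.1)
  else st

theorem pvFold_nomatch (f : Int × Int × String × List Char → Bool)
    (xs : List (Int × Int × String × List Char)) (st : Option Int × String)
    (h : ∀ e ∈ xs, f e = false) : xs.foldl (pvSelStep f) st = st := by
  induction xs generalizing st with
  | nil => rfl
  | cons a xs ih =>
    have ha := h a (by simp)
    simp only [List.foldl_cons]
    rw [show pvSelStep f st a = st by simp [pvSelStep, ha]]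
    exact ih _ (fun e he => h e (by simp [he]))

theorem pvFold_keep (f : Int × Int × String × List Char → Bool)
    (xs : List (Int × Int × String × List Char)) (t : Int) (ttl : String)
    (h : ∀ e ∈ xs, f e = true → ¬ t < e.1) :
    xs.foldl (pvSelStep f) (some t, ttl) = (some t, ttl) := by
  induction xs with
  | nil => rfl
  | cons a xs ih =>
    simp only [List.foldl_cons, pvSelStep]
    have step : (if f a && (match (some t : Option Int) with | none => true | some b => decide (b < a.1)) then (some a.1, a.2.2.1) else ((some t : Option Int), ttl)) = ((some t : Option Int), ttl) := by
      by_cases hf : f a = true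
      · have := h a (by simp) hf
        simp [hf, this]
      · simp [Bool.not_eq_true] at hf
        simp [hf]
    rw [step]
    exact ih (fun e he => h e (by simp [he]))

theorem pvFold_pick (f : Int × Int × String × List Char → Bool) :
    ∀ (arr : List (Int × Int × String × List Char)),
    arr.Pairwise (fun a b => b.2.1 < a.2.1) →
    ∀ m, m ∈ arr → f m = true → (∀ e ∈ arr, f e = true → pvLt m e = false) →
    ∀ st : Option Int × String, (match st.1 with | none => True | some b => b < m.1) →
    arr.foldl (pvSelStep f) st = (some m.1, m.2.2.1) := by
  intro arr
  induction arr with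
  | nil => intro _ m hm; exact absurd hm (by simp)
  | cons a rest ih =>
    intro hpw m hm hfm hdom st hst
    rw [List.pairwise_cons] at hpw
    obtain ⟨ha, hrest⟩ := hpw
    by_cases hma : m = a
    · subst hma
      have hstep : pvSelStep f st m = (some m.1, m.2.2.1) := by
        unfold pvSelStep
        rw [if_pos]
        rw [hfm, Bool.true_and]
        cases hst1 : st.1 with
        | none => rfl
        | some b => rw [hst1] at hst; simpa using hst
      rw [List.foldl_cons, hstep]
      apply pvFold_keep
      intro e he hfe
      have := hdom e (by simp [he]) hfe
      rw [pvLt_false_iff] at this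
      exact this.1
    · have hm' : m ∈ rest := by
        rcases List.mem_cons.mp hm with rfl | h'
        · exact absurd rfl hma
        · exact h'
      rw [List.foldl_cons]
      refine ih hrest m hm' hfm (fun e he hfe => hdom e (by simp [he]) hfe) _ ?_
      by_cases hfa : f a = true
      · have hlt : a.1 < m.1 := by
          have hd := hdom a (by simp) hfa
          rw [pvLt_false_iff] at hd
          have hk := ha m hm'
          omega
        unfold pvSelStep
        by_cases hc : (f a && (match st.1 with | none => true | some b => decide (b < a.1))) = true
        · rw [if_pos hc]
          exact hlt
        · rw [if_neg hc]
          exact hst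
      · unfold pvSelStep
        rw [Bool.not_eq_true] at hfa
        rw [if_neg (by simp [hfa])]
        exact hst

theorem pvMain (f : Int × Int × String × List Char → Bool)
    (arr : List (Int × Int × String × List Char))
    (hk2 : arr.Pairwise (fun a b => b.2.1 < a.2.1)) :
    (match (arr.foldl pvIns []).find? f with
     | some x => x.2.2.1
     | none => "(None)")
    = (arr.foldl (pvSelStep f) ((none : Option Int), "(None)")).2 := by
  have hperm : (arr.foldl pvIns []).Perm arr := by simpa using pvFoldIns_perm arr []
  have hpw : (arr.foldl pvIns []).Pairwise (fun a b => pvLt a b = false) :=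
    pvFoldIns_pairwise arr [] List.Pairwise.nil
  by_cases hex : ∃ e ∈ arr, f e = true
  · obtain ⟨e0, he0, hfe0⟩ := hex
    have hsome : (List.find? f (arr.foldl pvIns [])).isSome := by
      rw [List.find?_isSome]
      exact ⟨e0, hperm.mem_iff.mpr he0, hfe0⟩
    obtain ⟨m, hm⟩ := Option.isSome_iff_exists.mp hsome
    rw [hm]
    rw [List.find?_eq_some_iff_append] at hm
    obtain ⟨hfm, as, bs, hL, has⟩ := hm
    have hmem : m ∈ arr := hperm.mem_iff.mp (by rw [hL]; simp)
    have hdom : ∀ e ∈ arr, f e = true → pvLt m e = false := by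
      intro e he hfe
      have heL : e ∈ as ++ m :: bs := by rw [← hL]; exact hperm.mem_iff.mpr he
      rcases List.mem_append.mp heL with h1 | h2
      · have := has e h1
        simp only [Bool.not_eq_eq_eq_not, Bool.not_true] at this
        rw [this] at hfe
        exact absurd hfe Bool.false_ne_true
      · rcases List.mem_cons.mp h2 with rfl | hbs
        · rw [pvLt_false_iff]; omega
        · rw [hL] at hpw
          have := (List.pairwise_append.mp hpw).2.1
          rw [List.pairwise_cons] at this
          exact this.1 e hbs
    rw [pvFold_pick f arr hk2 m hmem hfm hdom (none, "(None)") trivial]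
  · push_neg at hex
    have hnone : List.find? f (arr.foldl pvIns []) = none := by
      rw [List.find?_eq_none]
      intro x hx
      exact hex x (hperm.mem_iff.mp hx)
    rw [hnone, pvFold_nomatch f arr _ (fun e he => Bool.not_eq_true _ ▸ Bool.eq_false_iff.mpr (hex e he))]

theorem pvEntry_snd (n : Int) (p : Int × String) (hp : (pvParseA p.2).isSome) :
    (pvEntry n p).2.1 = n - p.1 := by
  unfold pvEntry
  obtain ⟨v, hv⟩ := Option.isSome_iff_exists.mp hp
  rw [hv]

theorem pvArr_pairwise (n : Int) (infos : List String) (s : Int)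
    (h : ∀ info ∈ infos, pvInfoOk info = true) :
    (((PySem.List.enumerate infos s).map (pvEntry n)).Pairwise (fun a b => b.2.1 < a.2.1)) := by
  rw [List.pairwise_map]
  refine List.Pairwise.imp_of_mem ?_ (PySem.List.pairwise_lt_enumerate infos s)
  intro p q hp hq hlt
  have hps : (pvParseA p.2).isSome := by
    obtain ⟨t, ttl, sg, hx⟩ := pvInfoOk_parse p.2
      (h p.2 (by rw [← PySem.List.map_snd_enumerate infos s]; exact List.mem_map_of_mem hp))
    simp [hx]
  have hqs : (pvParseA q.2).isSome := by
    obtain ⟨t, ttl, sg, hx⟩ := pvInfoOk_parse q.2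
      (h q.2 (by rw [← PySem.List.map_snd_enumerate infos s]; exact List.mem_map_of_mem hq))
    simp [hx]
  rw [pvEntry_snd n p hps, pvEntry_snd n q hqs]
  omega

theorem pvFoldB_bridge (mem : List Char) (n : Int) :
    ∀ (infos : List String) (s : Int) (st : Option Int × String),
    (∀ info ∈ infos, pvInfoOk info = true) →
    ((PySem.List.enumerate infos s).map (pvEntry n)).foldl
        (pvSelStep (fun x => PySem.Chars.isIn mem x.2.2.2)) st
      = infos.foldl (pvBStep mem) st := by
  intro infos
  induction infos with
  | nil => intro s st _; rw [PySem.List.enumerate_nil]; rfl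
  | cons info rest ih =>
    intro s st h
    rw [PySem.List.enumerate_cons]
    simp only [List.map_cons, List.foldl_cons]
    obtain ⟨t, ttl, sg, hp⟩ := pvInfoOk_parse info (h info (by simp))
    have hg : pvEntry n (s, info) = (t, n - s, ttl, sg) := by
      unfold pvEntry; rw [show ((s, info) : Int × String).2 = info from rfl, hp]
    rw [hg]
    have hstep : pvSelStep (fun x => PySem.Chars.isIn mem x.2.2.2) st (t, n - s, ttl, sg)
        = pvBStep mem st info := by
      unfold pvSelStep pvBStep
      rw [pvParseB_eq, hp]
    rw [hstep]
    exact ih (s + 1) _ (fun i hi => h i (by simp [hi]))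

theorem solution_eq (memory : String) (musicinfos : List String)
    (h : Pre_solution memory musicinfos) :
    solution memory musicinfos = solution_alt memory musicinfos := by
  have hall : ∀ info ∈ musicinfos, pvInfoOk info = true := by
    unfold Pre_solution at h
    simpa [List.all_eq_true] using h
  simp only [solution, solution_alt]
  rw [pvSorted2_eq, pvNormB_eq]
  rw [← pvFoldB_bridge (pvNormA memory.toList) (musicinfos.length : Int) musicinfos 0
        ((none : Option Int), "(None)") hall]
  exact pvMain (fun x => PySem.Chars.isIn (pvNormA memory.toList) x.2.2.2)
    ((PySem.List.enumerate musicinfos).map (pvEntry (musicinfos.length : Int)))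
    (pvArr_pairwise (musicinfos.length : Int) musicinfos 0 hall)

-- ===== VERDICT (by name: the statement is the Claim_ definition above) =====
theorem solution_spec : Claim_equal_solution := by
  intro memory musicinfos _ hpre
  unfold Spec_solution
  exact solution_eq memory musicinfos hpre
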